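-- pv_equiv track=rewrite | github.com/trunglam1107/coding | Study/Python/app_tinh_duyen.py | boi_tinh_duyen
-- ===== SOURCE A (Python) =====
-- def boi_tinh_duyen(ten_nam , ten_nu):
--     ten_nam = ten_nam.lower()
--     ten_nu = ten_nu.lower()
--
--     dem = 0
--
--     for chu_cai in range(ord('a'),ord('z')+1):
--         if (chr(chu_cai) in ten_nam) and  (chr(chu_cai) in ten_nu) :
--             dem = dem + 1
--
--     if dem == 0:
--         ket_qua = "Binh thuong"
--     elif dem < 3 :
--         ket_qua = "Friend zone"
--     else :
--         ket_qua = "Hop nhau"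
--     return ket_qua
-- ===== SOURCE B (Python) =====
-- def boi_tinh_duyen(ten_nam, ten_nu):
--     letters_nam = set()
--     for ch in ten_nam.lower():
--         if 'a' <= ch <= 'z':
--             letters_nam.add(ch)
--     dem = 0
--     seen = set()
--     for ch in ten_nu.lower():
--         if ch in letters_nam and ch not in seen:
--             seen.add(ch)
--             dem += 1
--             if dem == 3:
--                 return "Hop nhau"
--     return "Binh thuong" if dem == 0 else "Friend zone"
-- ===== Notes on version B (the rewrite author's own statement) =====
-- stated objective: alternative
-- what changed: Instead of A's fixed 26-iteration loop over the alphabet with two substring-membership tests per letter, B makes one pass over the first name building its set of letters, then a single early-exit pass over the second name that counts newly-seen common letters and returns 'Hop nhau' as soon as the count reaches 3.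
import Mathlib
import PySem

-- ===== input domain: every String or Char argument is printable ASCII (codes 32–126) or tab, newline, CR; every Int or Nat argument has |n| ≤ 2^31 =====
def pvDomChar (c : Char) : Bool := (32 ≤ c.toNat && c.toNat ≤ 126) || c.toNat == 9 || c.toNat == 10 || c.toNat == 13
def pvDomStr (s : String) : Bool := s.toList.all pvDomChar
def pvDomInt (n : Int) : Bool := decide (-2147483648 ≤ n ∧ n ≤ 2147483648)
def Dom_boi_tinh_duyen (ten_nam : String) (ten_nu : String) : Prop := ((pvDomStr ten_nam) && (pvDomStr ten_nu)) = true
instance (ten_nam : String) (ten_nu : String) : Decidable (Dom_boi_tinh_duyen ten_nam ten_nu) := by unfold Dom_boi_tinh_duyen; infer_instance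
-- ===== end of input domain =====

-- B replaces A's 26-iteration alphabet scan with a character-level pass: a one-pass letter-set build over the first name, then a single early-exit scan of the second name that stops as soon as 3 common letters are found (alternative algorithm, same result).


-- ===== PORT A =====
def boi_tinh_duyen (ten_nam : String) (ten_nu : String) : String :=
  let tn := PySem.Str.lower ten_nam
  let tu := PySem.Str.lower ten_nu
  let dem : Int := (PySem.List.pyRange 97 123 1).foldl
    (fun dem chu_cai =>
      if PySem.Str.isIn (String.ofList [Char.ofNat chu_cai.toNat]) tn
         && PySem.Str.isIn (String.ofList [Char.ofNat chu_cai.toNat]) tu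
      then dem + 1 else dem) 0
  if dem == 0 then "Binh thuong"
  else if dem < 3 then "Friend zone"
  else "Hop nhau"

-- ===== PORT B =====
-- first loop of Source B: build the set of lowercase letters occurring in the (lowered) first name
def pvLettersB (chars : List Char) : PySem.Set Char :=
  chars.foldl (fun s ch => if 'a' ≤ ch ∧ ch ≤ 'z' then PySem.Set.add s ch else s) PySem.Set.empty

-- second loop of Source B: scan the second name, counting new common letters, early-return at 3
def pvLoopB (lnam : PySem.Set Char) (chars : List Char) (seen : PySem.Set Char) (dem : Int) : String :=
  match chars with
  | [] => if dem == 0 then "Binh thuong" else "Friend zone"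
  | ch :: rest =>
    if PySem.Set.contains lnam ch && !(PySem.Set.contains seen ch) then
      if dem + 1 == 3 then "Hop nhau"
      else pvLoopB lnam rest (PySem.Set.add seen ch) (dem + 1)
    else pvLoopB lnam rest seen dem

def boi_tinh_duyen_alt (ten_nam : String) (ten_nu : String) : String :=
  pvLoopB (pvLettersB (PySem.Str.lower ten_nam).toList)
    (PySem.Str.lower ten_nu).toList PySem.Set.empty 0

-- ===== PRECONDITION & SPEC =====
def Spec_boi_tinh_duyen (ten_nam : String) (ten_nu : String) (out : String) : Prop := out = boi_tinh_duyen_alt ten_nam ten_nu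
instance (ten_nam : String) (ten_nu : String) (out : String) : Decidable (Spec_boi_tinh_duyen ten_nam ten_nu out) := by unfold Spec_boi_tinh_duyen; infer_instance

-- ===== CLAIM (what is proved, stated in full; the proofs are below) =====
def Claim_equal_boi_tinh_duyen : Prop := ∀ (ten_nam : String) (ten_nu : String), Dom_boi_tinh_duyen ten_nam ten_nu → Spec_boi_tinh_duyen ten_nam ten_nu (boi_tinh_duyen ten_nam ten_nu)

-- ===== LEMMAS AND PROOFS =====

-- the alphabet list A iterates over
def pvAlpha : List Char := "abcdefghijklmnopqrstuvwxyz".toList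

-- the number of not-yet-seen common letters remaining in `rest`
def pvNcount (lnam seen : PySem.Set Char) (rest : List Char) : ℕ :=
  (rest.toFinset.filter (fun c => c ∈ lnam ∧ c ∉ seen)).card

-- A's counting loop is countP
theorem pv_foldl_count (l : List Int) (p : Int → Bool) (n : Int) :
    l.foldl (fun d c => if p c then d + 1 else d) n = n + (l.countP p : Int) := by
  induction l generalizing n with
  | nil => simp
  | cons x xs ih =>
    simp only [List.foldl_cons, List.countP_cons, ih]
    by_cases h : p x <;> simp [h]
    ring

-- single-character 'in' on char lists is membership
theorem pv_isIn_singleton (c : Char) (l : List Char) :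
    PySem.Chars.isIn [c] l = decide (c ∈ l) := by
  by_cases h : c ∈ l
  · have : [c] <:+: l := by
      obtain ⟨pre, suf, hps⟩ := List.append_of_mem h
      exact ⟨pre, suf, by simp [hps]⟩
    simp [h, (PySem.Chars.isIn_iff_infix _ _).mpr this]
  · have : ¬ [c] <:+: l := fun hi => h (hi.sublist.mem (by simp))
    simp [h, (PySem.Chars.isIn_eq_false_iff _ _).mpr this]

set_option maxRecDepth 10000 in
theorem pv_pyRange_eq : PySem.List.pyRange 97 123 1 = pvAlpha.map (fun c => (c.toNat : Int)) := by
  rfl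

theorem pv_char_le_iff (c : Char) : ('a' ≤ c ∧ c ≤ 'z') ↔ (97 ≤ c.toNat ∧ c.toNat ≤ 122) := by
  rw [Char.le_def, Char.le_def, UInt32.le_iff_toNat_le, UInt32.le_iff_toNat_le]
  rfl

theorem pv_toNat_ofNat (n : ℕ) (h1 : 97 ≤ n) (h2 : n < 123) : (Char.ofNat n).toNat = n := by
  have hv : n.isValidChar := Or.inl (by omega)
  unfold Char.ofNat
  rw [dif_pos hv]
  simp [Char.ofNatAux, Char.toNat]

set_option maxRecDepth 4000 in
theorem pv_alpha_range : pvAlpha = (List.range' 97 26).map Char.ofNat := by decide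

theorem pv_mem_alpha (c : Char) : c ∈ pvAlpha ↔ ('a' ≤ c ∧ c ≤ 'z') := by
  rw [pv_alpha_range, pv_char_le_iff, List.mem_map]
  constructor
  · rintro ⟨n, hn, rfl⟩
    rw [List.mem_range'_1] at hn
    rw [pv_toNat_ofNat n hn.1 (by omega)]
    omega
  · rintro ⟨h1, h2⟩
    exact ⟨c.toNat, List.mem_range'_1.mpr ⟨h1, by omega⟩, Char.ofNat_toNat c⟩

-- membership in the letter set built by B's first loop
theorem pv_mem_lettersB_aux (l : List Char) (s : PySem.Set Char) (c : Char) :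
    c ∈ (l.foldl (fun s ch => if 'a' ≤ ch ∧ ch ≤ 'z' then PySem.Set.add s ch else s) s) ↔
    c ∈ s ∨ (c ∈ l ∧ 'a' ≤ c ∧ c ≤ 'z') := by
  induction l generalizing s with
  | nil => simp
  | cons ch rest ih =>
    simp only [List.foldl_cons]
    by_cases h : 'a' ≤ ch ∧ ch ≤ 'z'
    · rw [if_pos h, ih]
      simp only [PySem.Set.mem_add, List.mem_cons]
      constructor
      · rintro ((hs | rfl) | hm)
        · exact Or.inl hs
        · exact Or.inr ⟨Or.inl rfl, h⟩
        · exact Or.inr ⟨Or.inr hm.1, hm.2⟩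
      · rintro (hs | ⟨(rfl | hm), hc⟩)
        · exact Or.inl (Or.inl hs)
        · exact Or.inl (Or.inr rfl)
        · exact Or.inr ⟨hm, hc⟩
    · rw [if_neg h, ih]
      simp only [List.mem_cons]
      constructor
      · rintro (hs | hm)
        · exact Or.inl hs
        · exact Or.inr ⟨Or.inr hm.1, hm.2⟩
      · rintro (hs | ⟨(rfl | hm), hc⟩)
        · exact Or.inl hs
        · exact absurd hc h
        · exact Or.inr ⟨hm, hc⟩

theorem pv_mem_lettersB (tnl : List Char) (c : Char) :
    c ∈ pvLettersB tnl ↔ (c ∈ tnl ∧ 'a' ≤ c ∧ c ≤ 'z') := by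
  unfold pvLettersB
  rw [pv_mem_lettersB_aux]
  simp [PySem.Set.empty]

-- characterisation of B's early-exit loop
theorem pv_loopB_eq (lnam : PySem.Set Char) (rest : List Char) :
    ∀ (seen : PySem.Set Char) (dem : Int), 0 ≤ dem → dem < 3 →
    pvLoopB lnam rest seen dem =
      (if 3 ≤ dem + (pvNcount lnam seen rest : Int) then "Hop nhau"
       else if dem + (pvNcount lnam seen rest : Int) == 0 then "Binh thuong"
       else "Friend zone") := by
  induction rest with
  | nil =>
    intro seen dem h0 h3
    simp only [pvLoopB, pvNcount, List.toFinset_nil, Finset.filter_empty, Finset.card_empty,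
      Nat.cast_zero, add_zero]
    rw [if_neg (show ¬ 3 ≤ dem by omega)]
  | cons ch rest ih =>
    intro seen dem h0 h3
    by_cases hc : ch ∈ lnam ∧ ch ∉ seen
    · have hcond : (PySem.Set.contains lnam ch && !PySem.Set.contains seen ch) = true := by
        simp only [Bool.and_eq_true, Bool.not_eq_true']
        refine ⟨(PySem.Set.contains_iff _ _).mpr hc.1, ?_⟩
        cases hs : PySem.Set.contains seen ch
        · rfl
        · exact absurd ((PySem.Set.contains_iff _ _).mp hs) hc.2
      have hcount : pvNcount lnam seen (ch :: rest) = pvNcount lnam (PySem.Set.add seen ch) rest + 1 := by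
        unfold pvNcount
        have hset : (ch :: rest).toFinset.filter (fun c => c ∈ lnam ∧ c ∉ seen)
            = insert ch (rest.toFinset.filter (fun c => c ∈ lnam ∧ c ∉ PySem.Set.add seen ch)) := by
          ext x
          simp only [Finset.mem_insert, Finset.mem_filter, List.mem_toFinset, List.mem_cons,
            PySem.Set.mem_add]
          by_cases hx : x = ch
          · subst hx
            simp [hc.1, hc.2]
          · tauto
        rw [hset, Finset.card_insert_of_notMem (by
          simp only [Finset.mem_filter, List.mem_toFinset, PySem.Set.mem_add]
          tauto)]
      by_cases hd : dem + 1 == 3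
      · simp only [pvLoopB, hcond, hd, if_pos]
        rw [hcount, if_pos (by push_cast; rw [beq_iff_eq] at hd; omega)]
      · simp only [pvLoopB, hcond, if_true, hd, Bool.false_eq_true, if_false]
        rw [ih (PySem.Set.add seen ch) (dem + 1) (by omega) (by rw [beq_iff_eq] at hd; omega)]
        rw [hcount]
        push_cast
        rw [show dem + 1 + (pvNcount lnam (PySem.Set.add seen ch) rest : Int)
          = dem + ((pvNcount lnam (PySem.Set.add seen ch) rest : Int) + 1) by ring]
    · have hcond : (PySem.Set.contains lnam ch && !PySem.Set.contains seen ch) = false := by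
        by_cases hl : ch ∈ lnam
        · have hs : ch ∈ seen := by tauto
          rw [(PySem.Set.contains_iff _ _).mpr hs]
          simp
        · have hlf : PySem.Set.contains lnam ch = false := by
            cases h : PySem.Set.contains lnam ch
            · rfl
            · exact absurd ((PySem.Set.contains_iff _ _).mp h) hl
          rw [hlf, Bool.false_and]
      have hcount : pvNcount lnam seen (ch :: rest) = pvNcount lnam seen rest := by
        unfold pvNcount
        congr 1
        ext x
        simp only [Finset.mem_filter, List.mem_toFinset, List.mem_cons]
        by_cases hx : x = ch
        · subst hx
          tauto
        · tauto
      simp only [pvLoopB, hcond, Bool.false_eq_true, if_false]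
      rw [ih seen dem h0 h3, hcount]

-- A's alphabet count equals B's distinct-common-letter count
theorem pv_counts_agree (tnl tul : List Char) :
    (pvAlpha.countP (fun c => decide (c ∈ tnl) && decide (c ∈ tul)))
      = pvNcount (pvLettersB tnl) PySem.Set.empty tul := by
  unfold pvNcount
  rw [List.countP_eq_length_filter]
  have hnd : (pvAlpha.filter (fun c => decide (c ∈ tnl) && decide (c ∈ tul))).Nodup :=
    (by decide : pvAlpha.Nodup).filter _
  rw [← List.toFinset_card_of_nodup hnd]
  congr 1
  ext x
  simp only [List.mem_toFinset, List.mem_filter, Finset.mem_filter, Bool.and_eq_true,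
    decide_eq_true_eq, pv_mem_alpha, pv_mem_lettersB]
  constructor
  · rintro ⟨ha, h1, h2⟩
    exact ⟨h2, ⟨h1, ha⟩, by simp [PySem.Set.empty]⟩
  · rintro ⟨h2, ⟨h1, ha⟩, _⟩
    exact ⟨ha, h1, h2⟩

-- the shared if/elif/else cascade, as a function of the count (proof-side helper)
def pvKetQua (dem : Int) : String :=
  if dem == 0 then "Binh thuong" else if dem < 3 then "Friend zone" else "Hop nhau"

-- ===== VERDICT (by name: the statement is the Claim_ definition above) =====
theorem boi_tinh_duyen_spec : Claim_equal_boi_tinh_duyen := by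
  unfold Claim_equal_boi_tinh_duyen
  intro ten_nam ten_nu _
  unfold Spec_boi_tinh_duyen boi_tinh_duyen boi_tinh_duyen_alt
  rw [pv_loopB_eq _ _ _ 0 (by omega) (by omega)]
  change pvKetQua _ = _
  have hA := pv_foldl_count (PySem.List.pyRange 97 123 1)
    (fun k => PySem.Str.isIn (String.ofList [Char.ofNat k.toNat]) (PySem.Str.lower ten_nam)
           && PySem.Str.isIn (String.ofList [Char.ofNat k.toNat]) (PySem.Str.lower ten_nu)) 0
  beta_reduce at hA
  rw [hA, zero_add, pv_pyRange_eq, List.countP_map]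
  have h1 : pvAlpha.countP
      ((fun k => PySem.Str.isIn (String.ofList [Char.ofNat k.toNat]) (PySem.Str.lower ten_nam)
             && PySem.Str.isIn (String.ofList [Char.ofNat k.toNat]) (PySem.Str.lower ten_nu))
        ∘ (fun c => (c.toNat : Int)))
      = pvAlpha.countP (fun c => decide (c ∈ (PySem.Str.lower ten_nam).toList) && decide (c ∈ (PySem.Str.lower ten_nu).toList)) := by
    apply List.countP_congr
    intro c hc
    have hr : Char.ofNat ((c.toNat : Int)).toNat = c := by
      simp [Int.toNat_natCast, Char.ofNat_toNat]
    simp only [Function.comp_apply, PySem.Str.isIn_eq, hr, String.toList_ofList, pv_isIn_singleton]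
  rw [h1, pv_counts_agree]
  unfold pvKetQua
  simp only [beq_iff_eq, zero_add]
  split_ifs <;> first | rfl | omega
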